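-- pv_equiv track=rewrite | github.com/chirag127/5th-sem-labs | code/daa.py | resource_allocation
-- ===== SOURCE A (Python) =====
-- def resource_allocation(tasks, resources):
--     # Initialize the task allocation
--     task_allocation = []
--     # Initialize the resource allocation
--     resource_allocation = []
--     # Initialize the visited vertices
--     visited_vertices = []
--     # Initialize the edges
--     edges = []
--     # For each task in the tasks
--     for task in tasks:
--         # For each resource in the resources
--         for i in range(len(resources)):
--             # If the resource is not in the visited vertices
--             if i not in visited_vertices:
--                 # Append the resource to the edges
--                 edges.append([task, i])
--     # Sort the edges by weight
--     edges.sort(key=lambda x: x[1])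
--     # For each edge in the edges
--     for edge in edges:
--         # If the edge is not in the spanning tree
--         if edge not in task_allocation:
--             # Append the edge to the spanning tree
--             task_allocation.append(edge)
--             # Append the weight of the edge to the spanning tree weights
--             resource_allocation.append(edge[1])
--             # Append the vertex of the edge to the visited vertices
--             visited_vertices.append(edge[0])
--             # Append the vertex of the edge to the visited vertices
--             visited_vertices.append(edge[1])
--     # Return the spanning tree and the spanning tree weights
--     return task_allocation, resource_allocation
-- ===== SOURCE B (Python) =====
-- def resource_allocation(tasks, resources):
--     # Generate the task-resource pairs already in final (resource-index) order,
--     # instead of building all edges and stable-sorting them by index.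
--     task_allocation = []
--     resource_allocation = []
--     for i in range(len(resources)):
--         for task in tasks:
--             edge = [task, i]
--             if edge not in task_allocation:
--                 task_allocation.append(edge)
--                 resource_allocation.append(i)
--     return task_allocation, resource_allocation
-- ===== Notes on version B (the rewrite author's own statement) =====
-- stated objective: simpler
-- what changed: B generates the task-resource pairs directly in resource-index-major order (index outer, tasks inner), eliminating A's full edge list, the stable sort by index, and the never-consulted visited_vertices list; the list-membership dedup is kept.
import Mathlib
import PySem

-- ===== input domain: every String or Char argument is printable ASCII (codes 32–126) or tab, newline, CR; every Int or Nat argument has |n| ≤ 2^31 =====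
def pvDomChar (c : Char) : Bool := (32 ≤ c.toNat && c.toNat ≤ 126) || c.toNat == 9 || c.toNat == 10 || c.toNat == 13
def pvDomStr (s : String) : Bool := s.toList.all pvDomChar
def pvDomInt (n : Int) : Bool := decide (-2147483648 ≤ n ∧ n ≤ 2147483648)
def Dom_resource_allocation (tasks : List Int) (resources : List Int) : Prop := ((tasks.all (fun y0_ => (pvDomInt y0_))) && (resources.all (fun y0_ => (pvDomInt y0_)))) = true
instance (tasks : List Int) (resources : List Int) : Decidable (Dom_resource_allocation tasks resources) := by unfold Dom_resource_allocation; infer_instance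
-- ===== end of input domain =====

-- B generates the pairs directly in the final (resource-index-major) order, dropping A's
-- edge list, its stable sort and the never-consulted visited list (objective: simpler).

-- ===== PORT A =====
-- State of the first loop: (edges, visited_vertices).  State of the second: (task_allocation, resource_allocation, visited_vertices).
def resource_allocation (tasks : List Int) (resources : List Int) : List (List Int) × List Int :=
  let st1 :=
    tasks.foldl (fun (s : List (List Int) × List Int) task =>
      (PySem.List.pyRange 0 (PySem.List.len resources) 1).foldl
        (fun (s : List (List Int) × List Int) i =>
          if i ∉ s.2 then (s.1 ++ [[task, i]], s.2) else s) s)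
      ([], [])
  let edges := PySem.List.sorted st1.1 (fun x => PySem.List.pyGetD x 1 0) false
  let st2 :=
    edges.foldl (fun (s : List (List Int) × List Int × List Int) edge =>
      if edge ∉ s.1 then
        (s.1 ++ [edge], s.2.1 ++ [PySem.List.pyGetD edge 1 0],
         s.2.2 ++ [PySem.List.pyGetD edge 0 0, PySem.List.pyGetD edge 1 0])
      else s)
      ([], [], st1.2)
  (st2.1, st2.2.1)

-- ===== PORT B =====
def resource_allocation_alt (tasks : List Int) (resources : List Int) : List (List Int) × List Int :=
  (PySem.List.pyRange 0 (PySem.List.len resources) 1).foldl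
    (fun (s : List (List Int) × List Int) i =>
      tasks.foldl (fun (s : List (List Int) × List Int) task =>
        if [task, i] ∉ s.1 then (s.1 ++ [[task, i]], s.2 ++ [i]) else s) s)
    ([], [])

-- ===== PRECONDITION & SPEC =====
def Spec_resource_allocation (tasks : List Int) (resources : List Int) (out : List (List Int) × List Int) : Prop := out = resource_allocation_alt tasks resources
instance (tasks : List Int) (resources : List Int) (out : List (List Int) × List Int) : Decidable (Spec_resource_allocation tasks resources out) := by unfold Spec_resource_allocation; infer_instance

-- ===== CLAIM (what is proved, stated in full; the proofs are below) =====
def Claim_equal_resource_allocation : Prop := ∀ (tasks : List Int) (resources : List Int), Dom_resource_allocation tasks resources → Spec_resource_allocation tasks resources (resource_allocation tasks resources)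

-- ===== LEMMAS AND PROOFS =====

-- the strict-less comparator of A's stable sort
def pvBlt (x y : List Int) : Bool := decide (PySem.List.pyGetD x 1 0 < PySem.List.pyGetD y 1 0)

-- the i-major pair list (what B generates; what A's sort produces)
def pvTr (ts : List Int) (R : List Int) : List (List Int) :=
  R.flatMap (fun i => ts.map (fun t => [t, i]))

-- A's first loop never touches visited, so it collects all edges task-major
theorem pv_loop1_inner (t : Int) (R : List Int) (es : List (List Int)) :
    R.foldl (fun (s : List (List Int) × List Int) i =>
        if i ∉ s.2 then (s.1 ++ [[t, i]], s.2) else s) (es, ([] : List Int))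
      = (es ++ R.map (fun i => [t, i]), []) := by
  induction R generalizing es with
  | nil => simp
  | cons i R ih => simp only [List.foldl_cons, List.not_mem_nil, not_false_eq_true, if_pos]; simpa using ih (es ++ [[t, i]])

theorem pv_loop1 (tasks R : List Int) (es : List (List Int)) :
    tasks.foldl (fun (s : List (List Int) × List Int) task =>
        R.foldl (fun (s : List (List Int) × List Int) i =>
          if i ∉ s.2 then (s.1 ++ [[task, i]], s.2) else s) s) (es, [])
      = (es ++ tasks.flatMap (fun t => R.map (fun i => [t, i])), []) := by
  induction tasks generalizing es with
  | nil => simp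
  | cons t ts ih =>
      rw [List.foldl_cons, pv_loop1_inner, ih]
      simp

theorem pv_insertBy_mid (G H : List (List Int)) (x : List Int)
    (hG : ∀ y ∈ G, pvBlt x y = false) :
    PySem.List.insertBy pvBlt x (G ++ H) = G ++ PySem.List.insertBy pvBlt x H := by
  induction G with
  | nil => simp
  | cons g G ih =>
      have hg : pvBlt x g = false := hG g (by simp)
      show (if pvBlt x g then _ else _) = _
      simp [hg, ih (fun y hy => hG y (by simp [hy]))]

theorem pv_insertBy_front (H : List (List Int)) (x : List Int)
    (hH : ∀ y ∈ H, pvBlt x y = true) :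
    PySem.List.insertBy pvBlt x H = x :: H := by
  cases H with
  | nil => rfl
  | cons h H =>
      show (if pvBlt x h then _ else _) = _
      simp [hH h (by simp)]

-- inserting the row of a new task into the i-major list of the previous tasks
theorem pv_insert_row (ts : List Int) (t : Int) (R1 R2 : List Int)
    (hp : (R1 ++ R2).Pairwise (· < ·)) :
    (R2.map (fun i => [t, i])).foldl
        (fun acc x => PySem.List.insertBy pvBlt x acc)
        (pvTr (ts ++ [t]) R1 ++ pvTr ts R2)
      = pvTr (ts ++ [t]) (R1 ++ R2) := by
  induction R2 generalizing R1 with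
  | nil => simp [pvTr]
  | cons i R2 ih =>
      have key : ∀ s j : Int, PySem.List.pyGetD [s, j] 1 0 = j := by
        intro s j; rfl
      have hR1 : ∀ j ∈ R1, j < i := by
        intro j hj
        exact (List.pairwise_append.1 hp).2.2 j hj i (by simp)
      have hR2 : ∀ j ∈ R2, i < j := by
        intro j hj
        have := (List.pairwise_append.1 hp).2.1
        exact (List.pairwise_cons.1 this).1 j hj
      have step :
          PySem.List.insertBy pvBlt [t, i] (pvTr (ts ++ [t]) R1 ++ pvTr ts (i :: R2))
            = pvTr (ts ++ [t]) (R1 ++ [i]) ++ pvTr ts R2 := by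
        have h1 : pvTr ts (i :: R2) = ts.map (fun s => [s, i]) ++ pvTr ts R2 := by
          simp [pvTr]
        rw [h1, ← List.append_assoc]
        rw [pv_insertBy_mid]
        · rw [pv_insertBy_front]
          · simp [pvTr, List.flatMap_append]
          · intro y hy
            simp only [pvTr, List.mem_flatMap, List.mem_map] at hy
            obtain ⟨j, hj, s, _, rfl⟩ := hy
            simp [pvBlt, key, hR2 j hj]
        · intro y hy
          simp only [pvTr, List.mem_append, List.mem_flatMap, List.mem_map] at hy
          rcases hy with ⟨j, hj, s, _, rfl⟩ | ⟨s, _, rfl⟩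
          · have := hR1 j hj; simp [pvBlt, key]; omega
          · simp [pvBlt, key]
      rw [List.map_cons, List.foldl_cons, step]
      have hp' : ((R1 ++ [i]) ++ R2).Pairwise (· < ·) := by
        simpa using hp
      simpa using ih (R1 ++ [i]) hp'
  
-- A's stable sort of the task-major list is the i-major list
theorem pv_sorted_tr (tasks R : List Int) (hp : R.Pairwise (· < ·)) :
    PySem.List.sorted (tasks.flatMap (fun t => R.map (fun i => [t, i])))
        (fun x => PySem.List.pyGetD x 1 0) false
      = pvTr tasks R := by
  rw [PySem.List.sorted_eq_foldl_insertBy]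
  have main : ∀ ts : List Int,
      (ts.flatMap (fun t => R.map (fun i => [t, i]))).foldl
          (fun acc x => PySem.List.insertBy pvBlt x acc) []
        = pvTr ts R := by
    intro ts
    induction ts using List.reverseRecOn with
    | nil => simp [pvTr]
    | append_singleton ts t ih =>
        rw [List.flatMap_append, List.foldl_append, ih]
        have := pv_insert_row ts t [] R (by simpa using hp)
        simpa [pvTr] using this
  exact main tasks

-- the visited list in A's second loop does not influence the first two components
theorem pv_drop_visited (l : List (List Int)) (ta : List (List Int)) (ra vis : List Int) :
    ((l.foldl (fun (s : List (List Int) × List Int × List Int) edge =>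
        if edge ∉ s.1 then
          (s.1 ++ [edge], s.2.1 ++ [PySem.List.pyGetD edge 1 0],
           s.2.2 ++ [PySem.List.pyGetD edge 0 0, PySem.List.pyGetD edge 1 0])
        else s) (ta, ra, vis)).1,
     (l.foldl (fun (s : List (List Int) × List Int × List Int) edge =>
        if edge ∉ s.1 then
          (s.1 ++ [edge], s.2.1 ++ [PySem.List.pyGetD edge 1 0],
           s.2.2 ++ [PySem.List.pyGetD edge 0 0, PySem.List.pyGetD edge 1 0])
        else s) (ta, ra, vis)).2.1)
      = l.foldl (fun (s : List (List Int) × List Int) edge =>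
            if edge ∉ s.1 then (s.1 ++ [edge], s.2 ++ [PySem.List.pyGetD edge 1 0]) else s)
            (ta, ra) := by
  induction l generalizing ta ra vis with
  | nil => simp
  | cons e l ih =>
      by_cases he : e ∈ ta
      · simpa [he] using ih ta ra vis
      · simpa [he] using ih (ta ++ [e]) (ra ++ [PySem.List.pyGetD e 1 0])
          (vis ++ [PySem.List.pyGetD e 0 0, PySem.List.pyGetD e 1 0])

-- ===== VERDICT (by name: the statement is the Claim_ definition above) =====
theorem resource_allocation_spec : Claim_equal_resource_allocation := by
  intro tasks resources _
  unfold Spec_resource_allocation resource_allocation resource_allocation_alt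
  set R := PySem.List.pyRange 0 (PySem.List.len resources) 1 with hR
  have hp : R.Pairwise (· < ·) := PySem.List.pairwise_lt_pyRange_one 0 _
  rw [pv_loop1 tasks R []]
  simp only [List.nil_append]
  rw [pv_sorted_tr tasks R hp]
  rw [pv_drop_visited (pvTr tasks R) [] [] []]
  simp only [pvTr, List.foldl_flatMap, List.foldl_map]
  rfl
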